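-- pv_equiv track=rewrite | github.com/autoppia/autoppia_iwa | autoppia_iwa/src/demo_webs/projects/cinema_1/replace_functions.py | add_comment_replace_func
-- ===== SOURCE A (Python) =====
-- def add_comment_replace_func(text: str) -> str:
--     """Replace placeholders for comment content, commenter name, and movie name with specific values."""
--     if not isinstance(text, str):
--         return text
--
--     replacements = {
--         "<comment>": "This movie was amazing! Highly recommended.",
--         "<commenter_name>": "MovieFan123",
--         "<movie_name>": "Inception",
--     }
--
--     for placeholder, value in replacements.items():
--         text = text.replace(placeholder, value)
--
--     return text
-- ===== SOURCE B (Python) =====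
-- def add_comment_replace_func(text: str) -> str:
--     """Replace placeholders for comment content, commenter name, and movie name with specific values."""
--     if not isinstance(text, str):
--         return text
--
--     pairs = (
--         ("<comment>", "This movie was amazing! Highly recommended."),
--         ("<commenter_name>", "MovieFan123"),
--         ("<movie_name>", "Inception"),
--     )
--
--     # Single left-to-right scan: at each position emit the value of the first
--     # placeholder that matches there, otherwise copy the character.
--     out = []
--     i = 0
--     n = len(text)
--     while i < n:
--         for placeholder, value in pairs:
--             if text.startswith(placeholder, i):
--                 out.append(value)
--                 i += len(placeholder)
--                 break
--         else:
--             out.append(text[i])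
--             i += 1
--     return "".join(out)
-- ===== Notes on version B (the rewrite author's own statement) =====
-- stated objective: alternative
-- what changed: A makes three separate full-string .replace passes (one per placeholder); B scans the text once left-to-right, substituting the first matching placeholder at each position and copying other characters.
import Mathlib
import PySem

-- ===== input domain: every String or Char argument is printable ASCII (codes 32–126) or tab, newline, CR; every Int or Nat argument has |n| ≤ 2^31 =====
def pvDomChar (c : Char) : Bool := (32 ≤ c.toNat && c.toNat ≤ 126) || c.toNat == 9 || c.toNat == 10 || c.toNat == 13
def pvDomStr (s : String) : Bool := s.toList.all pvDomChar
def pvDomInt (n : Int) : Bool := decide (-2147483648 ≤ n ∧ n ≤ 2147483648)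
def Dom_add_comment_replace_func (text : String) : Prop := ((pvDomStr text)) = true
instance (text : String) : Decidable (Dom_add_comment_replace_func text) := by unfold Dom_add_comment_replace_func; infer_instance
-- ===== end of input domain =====

-- B replaces A's three successive full-string `.replace` passes by a single left-to-right
-- scan that substitutes the first matching placeholder at each position (objective: alternative).

-- ===== PORT A =====
-- A: three sequential str.replace calls, in dict insertion order.
def add_comment_replace_func (text : String) : String :=
  let t1 := PySem.Str.replace text "<comment>" "This movie was amazing! Highly recommended."
  let t2 := PySem.Str.replace t1 "<commenter_name>" "MovieFan123"
  let t3 := PySem.Str.replace t2 "<movie_name>" "Inception"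
  t3

-- ===== PORT B =====
-- the three placeholders and their values, as char lists (B scans characterwise)
def pvK1 : List Char := ['<', 'c', 'o', 'm', 'm', 'e', 'n', 't', '>']
def pvK2 : List Char := ['<', 'c', 'o', 'm', 'm', 'e', 'n', 't', 'e', 'r', '_', 'n', 'a', 'm', 'e', '>']
def pvK3 : List Char := ['<', 'm', 'o', 'v', 'i', 'e', '_', 'n', 'a', 'm', 'e', '>']
def pvV1 : List Char := ['T', 'h', 'i', 's', ' ', 'm', 'o', 'v', 'i', 'e', ' ', 'w', 'a', 's', ' ', 'a', 'm', 'a', 'z', 'i', 'n', 'g', '!', ' ', 'H', 'i', 'g', 'h', 'l', 'y', ' ', 'r', 'e', 'c', 'o', 'm', 'm', 'e', 'n', 'd', 'e', 'd', '.']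
def pvV2 : List Char := ['M', 'o', 'v', 'i', 'e', 'F', 'a', 'n', '1', '2', '3']
def pvV3 : List Char := ['I', 'n', 'c', 'e', 'p', 't', 'i', 'o', 'n']

-- B's while-loop: at each position, the first matching placeholder is substituted,
-- otherwise the character is copied.
def pvScan (l : List Char) : List Char :=
  if _h1 : pvK1.isPrefixOf l then pvV1 ++ pvScan (l.drop pvK1.length)
  else if _h2 : pvK2.isPrefixOf l then pvV2 ++ pvScan (l.drop pvK2.length)
  else if _h3 : pvK3.isPrefixOf l then pvV3 ++ pvScan (l.drop pvK3.length)
  else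
    match l with
    | [] => []
    | c :: t => c :: pvScan t
termination_by l.length
decreasing_by
  · have := (List.isPrefixOf_iff_prefix.mp _h1).length_le
    simp [pvK1] at this ⊢; omega
  · have := (List.isPrefixOf_iff_prefix.mp _h2).length_le
    simp [pvK2] at this ⊢; omega
  · have := (List.isPrefixOf_iff_prefix.mp _h3).length_le
    simp [pvK3] at this ⊢; omega
  · simp

def add_comment_replace_func_alt (text : String) : String :=
  String.ofList (pvScan text.toList)

-- ===== PRECONDITION & SPEC =====
def Spec_add_comment_replace_func (text : String) (out : String) : Prop := out = add_comment_replace_func_alt text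
instance (text : String) (out : String) : Decidable (Spec_add_comment_replace_func text out) := by unfold Spec_add_comment_replace_func; infer_instance

-- ===== CLAIM (what is proved, stated in full; the proofs are below) =====
def Claim_equal_add_comment_replace_func : Prop := ∀ (text : String), Dom_add_comment_replace_func text → Spec_add_comment_replace_func text (add_comment_replace_func text)

-- ===== LEMMAS AND PROOFS =====

-- structural reformulation of PySem.Chars.replace (fuel/accumulator-free), used only in proofs
def replCore (old new : List Char) (l : List Char) : List Char :=
  if h : old ≠ [] ∧ old.isPrefixOf l then new ++ replCore old new (l.drop old.length)
  else
    match l with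
    | [] => []
    | c :: t => c :: replCore old new t
termination_by l.length
decreasing_by
  · have hp := (List.isPrefixOf_iff_prefix.mp h.2).length_le
    have h0 : 0 < old.length := List.length_pos_iff.mpr h.1
    simp; omega
  · simp

lemma replCore_nil (old new : List Char) : replCore old new [] = [] := by
  rw [replCore]
  have : ¬ (old ≠ [] ∧ old.isPrefixOf ([] : List Char)) := by
    rintro ⟨h1, h2⟩
    exact h1 (List.prefix_nil.mp (List.isPrefixOf_iff_prefix.mp h2))
  rw [dif_neg this]

lemma replCore_step (old new l : List Char) (hold : old ≠ []) (hp : old.isPrefixOf l) :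
    replCore old new l = new ++ replCore old new (l.drop old.length) := by
  rw [replCore, dif_pos ⟨hold, hp⟩]

lemma replCore_key (old new : List Char) (h : old ≠ []) (l : List Char) :
    replCore old new (old ++ l) = new ++ replCore old new l := by
  rw [replCore, dif_pos ⟨h, List.isPrefixOf_iff_prefix.mpr (List.prefix_append _ _)⟩,
    List.drop_left]

lemma replCore_cons_not_prefix (old new : List Char) (c : Char) (t : List Char)
    (h : ¬ old <+: c :: t) :
    replCore old new (c :: t) = c :: replCore old new t := by
  rw [replCore]
  have : ¬ (old ≠ [] ∧ old.isPrefixOf (c :: t)) := by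
    rintro ⟨_, h2⟩; exact h (List.isPrefixOf_iff_prefix.mp h2)
  rw [dif_neg this]

lemma not_prefix_cons_of_head_ne (os ys : List Char) (a c : Char) (hc : c ≠ a) :
    ¬ (a :: os) <+: c :: ys := by
  intro h
  exact hc ((List.cons_prefix_cons.mp h).1.symm)

-- a key starting with '<' passes over a '<'-free segment unchanged
lemma replCore_seg (old new seg rest : List Char) (os : List Char) (hold : old = '<' :: os)
    (hseg : '<' ∉ seg) :
    replCore old new (seg ++ rest) = seg ++ replCore old new rest := by
  induction seg with
  | nil => simp
  | cons c seg' ih =>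
    have hc : c ≠ '<' := by intro h; exact hseg (by simp [h])
    rw [List.cons_append, replCore_cons_not_prefix _ _ _ _ (hold ▸ not_prefix_cons_of_head_ne _ _ _ _ hc),
      ih (by intro h; exact hseg (List.mem_cons_of_mem _ h))]
    simp

lemma prefix_append_short (cs v x : List Char) (h : cs <+: v ++ x) (hlen : cs.length ≤ v.length) :
    cs <+: v := by
  rw [List.prefix_iff_eq_take] at h ⊢
  rwa [List.take_append_of_le_length hlen] at h

-- no nonempty suffix `cs` of `pool` can become a prefix of `replCore old v t`
-- unless it already was a prefix of `t`
lemma np (old v pool : List Char) (os : List Char) (hold : old = '<' :: os)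
    (hlenp : pool.length ≤ v.length)
    (hv : ∀ cs, cs <:+ pool → cs ≠ [] → ¬ cs <+: v) :
    ∀ t cs, cs <:+ pool → cs ≠ [] → ¬ cs <+: t → ¬ cs <+: replCore old v t := by
  intro t
  induction t with
  | nil =>
    intro cs _ hne _ hc
    rw [replCore_nil] at hc
    exact hne (List.prefix_nil.mp hc)
  | cons c t' ih =>
    intro cs hsuf hne hnt hc
    by_cases hpre : old <+: c :: t'
    · obtain ⟨r, hr⟩ := hpre
      rw [← hr, replCore_key _ _ (by simp [hold]) r] at hc
      have hlen : cs.length ≤ v.length := le_trans (List.IsSuffix.length_le hsuf) hlenp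
      exact hv cs hsuf hne (prefix_append_short _ _ _ hc hlen)
    · rw [replCore_cons_not_prefix _ _ _ _ hpre] at hc
      cases cs with
      | nil => exact hne rfl
      | cons d cs' =>
        obtain ⟨hd, hcs'⟩ := List.cons_prefix_cons.mp hc
        subst hd
        have hne' : cs' ≠ [] := by
          rintro rfl
          exact hnt (by simp [List.cons_prefix_cons])
        have hnt' : ¬ cs' <+: t' := by
          intro h; exact hnt (List.cons_prefix_cons.mpr ⟨rfl, h⟩)
        have hsuf' : cs' <:+ pool := List.IsSuffix.trans (List.suffix_cons _ _) hsuf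
        exact ih cs' hsuf' hne' hnt' hcs'

-- PySem.Chars.replace agrees with replCore for a nonempty pattern
lemma go_eq (old new : List Char) (hold : old ≠ []) :
    ∀ (fuel : Nat) (l acc : List Char), l.length ≤ fuel →
      PySem.Chars.replace.go old new fuel l acc = acc.reverse ++ replCore old new l := by
  intro fuel
  induction fuel with
  | zero =>
    intro l acc hl
    have : l = [] := List.length_eq_zero_iff.mp (Nat.le_zero.mp hl)
    subst this
    rw [PySem.Chars.replace.go.eq_def, replCore_nil]
  | succ fuel ih =>
    intro l acc hl
    cases l with
    | nil =>
      rw [PySem.Chars.replace.go.eq_def, replCore_nil]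
      simp
    | cons c t =>
      have hstep : PySem.Chars.replace.go old new (fuel + 1) (c :: t) acc =
          if old.isPrefixOf (c :: t) = true then
            PySem.Chars.replace.go old new fuel (List.drop old.length (c :: t)) (new.reverse ++ acc)
          else PySem.Chars.replace.go old new fuel t (c :: acc) := rfl
      rw [hstep]
      by_cases hp : old.isPrefixOf (c :: t)
      · have hplen : 0 < old.length := List.length_pos_iff.mpr hold
        have hle : (List.drop old.length (c :: t)).length ≤ fuel := by
          simp at hl ⊢; omega
        rw [if_pos hp, ih _ _ hle, replCore_step old new (c :: t) hold hp]
        simp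
      · rw [if_neg hp, ih t (c :: acc) (by simp at hl ⊢; omega),
          replCore_cons_not_prefix _ _ _ _ (fun h => hp (List.isPrefixOf_iff_prefix.mpr h))]
        simp

lemma replace_eq_replCore (l old new : List Char) (hold : old ≠ []) :
    PySem.Chars.replace l old new = replCore old new l := by
  rw [PySem.Chars.replace, if_neg (by simp [hold]), go_eq old new hold l.length l [] le_rfl]
  simp

-- pvScan at nil and at each kind of head
lemma pvScan_nil : pvScan [] = [] := by rw [pvScan]; rfl

lemma pvScan_k1 (t : List Char) : pvScan (pvK1 ++ t) = pvV1 ++ pvScan t := by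
  rw [pvScan, dif_pos (List.isPrefixOf_iff_prefix.mpr (List.prefix_append _ _)), List.drop_left]

lemma pvScan_k2 (t : List Char) (h1 : ¬ pvK1 <+: pvK2 ++ t) :
    pvScan (pvK2 ++ t) = pvV2 ++ pvScan t := by
  rw [pvScan, dif_neg (fun h => h1 (List.isPrefixOf_iff_prefix.mp h)),
    dif_pos (List.isPrefixOf_iff_prefix.mpr (List.prefix_append _ _)), List.drop_left]

lemma pvScan_k3 (t : List Char) (h1 : ¬ pvK1 <+: pvK3 ++ t) (h2 : ¬ pvK2 <+: pvK3 ++ t) :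
    pvScan (pvK3 ++ t) = pvV3 ++ pvScan t := by
  rw [pvScan, dif_neg (fun h => h1 (List.isPrefixOf_iff_prefix.mp h)),
    dif_neg (fun h => h2 (List.isPrefixOf_iff_prefix.mp h)),
    dif_pos (List.isPrefixOf_iff_prefix.mpr (List.prefix_append _ _)), List.drop_left]

lemma pvScan_cons (c : Char) (t : List Char) (h1 : ¬ pvK1 <+: c :: t)
    (h2 : ¬ pvK2 <+: c :: t) (h3 : ¬ pvK3 <+: c :: t) :
    pvScan (c :: t) = c :: pvScan t := by
  rw [pvScan, dif_neg (fun h => h1 (List.isPrefixOf_iff_prefix.mp h)),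
    dif_neg (fun h => h2 (List.isPrefixOf_iff_prefix.mp h)),
    dif_neg (fun h => h3 (List.isPrefixOf_iff_prefix.mp h))]

lemma k2_cons_not_prefix (x : List Char)
    (h : ¬ (['c', 'o', 'm', 'm', 'e', 'n', 't', 'e', 'r', '_', 'n', 'a', 'm', 'e', '>'] : List Char) <+: x) :
    ¬ pvK2 <+: '<' :: x := by
  rw [show pvK2 = '<' :: ['c', 'o', 'm', 'm', 'e', 'n', 't', 'e', 'r', '_', 'n', 'a', 'm', 'e', '>'] from rfl]
  intro hh
  exact h (List.cons_prefix_cons.mp hh).2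

lemma k3_cons_not_prefix (x : List Char)
    (h : ¬ (['m', 'o', 'v', 'i', 'e', '_', 'n', 'a', 'm', 'e', '>'] : List Char) <+: x) :
    ¬ pvK3 <+: '<' :: x := by
  rw [show pvK3 = '<' :: ['m', 'o', 'v', 'i', 'e', '_', 'n', 'a', 'm', 'e', '>'] from rfl]
  intro hh
  exact h (List.cons_prefix_cons.mp hh).2

lemma k1_head_ne (c : Char) (ys : List Char) (hc : c ≠ '<') : ¬ pvK1 <+: c :: ys :=
  not_prefix_cons_of_head_ne _ _ _ _ hc

lemma k2_head_ne (c : Char) (ys : List Char) (hc : c ≠ '<') : ¬ pvK2 <+: c :: ys :=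
  not_prefix_cons_of_head_ne _ _ _ _ hc

lemma k3_head_ne (c : Char) (ys : List Char) (hc : c ≠ '<') : ¬ pvK3 <+: c :: ys :=
  not_prefix_cons_of_head_ne _ _ _ _ hc

-- the main induction: the three sequential replaces equal the single scan
lemma three_eq_scan : ∀ (n : Nat) (l : List Char), l.length ≤ n →
    replCore pvK3 pvV3 (replCore pvK2 pvV2 (replCore pvK1 pvV1 l)) = pvScan l := by
  intro n
  induction n with
  | zero =>
    intro l hl
    have : l = [] := List.length_eq_zero_iff.mp (Nat.le_zero.mp hl)
    subst this
    rw [replCore_nil, replCore_nil, replCore_nil, pvScan_nil]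
  | succ n ih =>
    intro l hl
    by_cases h1 : pvK1 <+: l
    · obtain ⟨t, rfl⟩ := h1
      rw [replCore_key _ _ (by simp [pvK1]) t,
        replCore_seg pvK2 pvV2 pvV1 _ _ rfl (by decide),
        replCore_seg pvK3 pvV3 pvV1 _ _ rfl (by decide),
        pvScan_k1, ih t (by simp [pvK1] at hl ⊢; omega)]
    · by_cases h2 : pvK2 <+: l
      · obtain ⟨t, rfl⟩ := h2
        have e2 : pvK2 ++ t = '<' :: (['c', 'o', 'm', 'm', 'e', 'n', 't', 'e', 'r', '_', 'n', 'a', 'm', 'e', '>'] ++ t) := rfl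
        rw [pvScan_k2 t h1, e2,
          replCore_cons_not_prefix _ _ _ _ (e2 ▸ h1),
          replCore_seg pvK1 pvV1 _ _ _ rfl (by decide),
          show ('<' :: (['c', 'o', 'm', 'm', 'e', 'n', 't', 'e', 'r', '_', 'n', 'a', 'm', 'e', '>'] ++ replCore pvK1 pvV1 t)) = pvK2 ++ replCore pvK1 pvV1 t from rfl,
          replCore_key _ _ (by simp [pvK2]) _,
          replCore_seg pvK3 pvV3 pvV2 _ _ rfl (by decide),
          ih t (by simp [pvK2] at hl ⊢; omega)]
      · by_cases h3 : pvK3 <+: l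
        · obtain ⟨t, rfl⟩ := h3
          have e3 : pvK3 ++ t = '<' :: (['m', 'o', 'v', 'i', 'e', '_', 'n', 'a', 'm', 'e', '>'] ++ t) := rfl
          rw [pvScan_k3 t h1 h2, e3,
            replCore_cons_not_prefix _ _ _ _ (e3 ▸ h1),
            replCore_seg pvK1 pvV1 _ _ _ rfl (by decide),
            replCore_cons_not_prefix _ _ _ _ (k2_cons_not_prefix _ (by simp [List.cons_prefix_cons])),
            replCore_seg pvK2 pvV2 _ _ _ rfl (by decide),
            show ('<' :: (['m', 'o', 'v', 'i', 'e', '_', 'n', 'a', 'm', 'e', '>'] ++ replCore pvK2 pvV2 (replCore pvK1 pvV1 t))) = pvK3 ++ replCore pvK2 pvV2 (replCore pvK1 pvV1 t) from rfl,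
            replCore_key _ _ (by simp [pvK3]) _,
            ih t (by simp [pvK3] at hl ⊢; omega)]
        · cases l with
          | nil => rw [replCore_nil, replCore_nil, replCore_nil, pvScan_nil]
          | cons c t =>
            have iht := ih t (by simp at hl; omega)
            by_cases hc : c = '<'
            · subst hc
              have hk2t : ¬ (['c', 'o', 'm', 'm', 'e', 'n', 't', 'e', 'r', '_', 'n', 'a', 'm', 'e', '>'] : List Char) <+: t := by
                intro h; exact h2 (List.cons_prefix_cons.mpr ⟨rfl, h⟩)
              have hk3t : ¬ (['m', 'o', 'v', 'i', 'e', '_', 'n', 'a', 'm', 'e', '>'] : List Char) <+: t := by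
                intro h; exact h3 (List.cons_prefix_cons.mpr ⟨rfl, h⟩)
              have nk2 : ¬ (['c', 'o', 'm', 'm', 'e', 'n', 't', 'e', 'r', '_', 'n', 'a', 'm', 'e', '>'] : List Char) <+: replCore pvK1 pvV1 t := by
                refine np pvK1 pvV1 _ _ rfl (by decide) ?_ t _ List.suffix_rfl (by decide) hk2t
                intro cs hcs hne
                exact (by decide : ∀ cs ∈ (['c', 'o', 'm', 'm', 'e', 'n', 't', 'e', 'r', '_', 'n', 'a', 'm', 'e', '>'] : List Char).tails, cs ≠ [] → ¬ cs <+: pvV1) cs ((List.mem_tails _ _).mpr hcs) hne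
              have nk3a : ¬ (['m', 'o', 'v', 'i', 'e', '_', 'n', 'a', 'm', 'e', '>'] : List Char) <+: replCore pvK1 pvV1 t := by
                refine np pvK1 pvV1 _ _ rfl (by decide) ?_ t _ List.suffix_rfl (by decide) hk3t
                intro cs hcs hne
                exact (by decide : ∀ cs ∈ (['m', 'o', 'v', 'i', 'e', '_', 'n', 'a', 'm', 'e', '>'] : List Char).tails, cs ≠ [] → ¬ cs <+: pvV1) cs ((List.mem_tails _ _).mpr hcs) hne
              have nk3 : ¬ (['m', 'o', 'v', 'i', 'e', '_', 'n', 'a', 'm', 'e', '>'] : List Char) <+: replCore pvK2 pvV2 (replCore pvK1 pvV1 t) := by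
                refine np pvK2 pvV2 _ _ rfl (by decide) ?_ _ _ List.suffix_rfl (by decide) nk3a
                intro cs hcs hne
                exact (by decide : ∀ cs ∈ (['m', 'o', 'v', 'i', 'e', '_', 'n', 'a', 'm', 'e', '>'] : List Char).tails, cs ≠ [] → ¬ cs <+: pvV2) cs ((List.mem_tails _ _).mpr hcs) hne
              rw [replCore_cons_not_prefix _ _ _ _ h1,
                replCore_cons_not_prefix _ _ _ _ (k2_cons_not_prefix _ nk2),
                replCore_cons_not_prefix _ _ _ _ (k3_cons_not_prefix _ nk3),
                pvScan_cons _ _ h1 h2 h3, iht]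
            · rw [replCore_cons_not_prefix _ _ _ _ (k1_head_ne c t hc),
                replCore_cons_not_prefix _ _ _ _ (k2_head_ne c _ hc),
                replCore_cons_not_prefix _ _ _ _ (k3_head_ne c _ hc),
                pvScan_cons _ _ (k1_head_ne c t hc) (k2_head_ne c t hc) (k3_head_ne c t hc), iht]

-- ===== VERDICT (by name: the statement is the Claim_ definition above) =====
theorem add_comment_replace_func_spec : Claim_equal_add_comment_replace_func := by
  intro text _
  unfold Spec_add_comment_replace_func add_comment_replace_func add_comment_replace_func_alt
  have hK1 : ("<comment>" : String).toList = pvK1 := by decide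
  have hK2 : ("<commenter_name>" : String).toList = pvK2 := by decide
  have hK3 : ("<movie_name>" : String).toList = pvK3 := by decide
  have hV1 : ("This movie was amazing! Highly recommended." : String).toList = pvV1 := by decide
  have hV2 : ("MovieFan123" : String).toList = pvV2 := by decide
  have hV3 : ("Inception" : String).toList = pvV3 := by decide
  have : (PySem.Str.replace (PySem.Str.replace (PySem.Str.replace text "<comment>" "This movie was amazing! Highly recommended.") "<commenter_name>" "MovieFan123") "<movie_name>" "Inception").toList = pvScan text.toList := by
    rw [PySem.Str.toList_replace, PySem.Str.toList_replace, PySem.Str.toList_replace,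
      hK1, hK2, hK3, hV1, hV2, hV3,
      replace_eq_replCore _ _ _ (by decide),
      replace_eq_replCore _ _ _ (by decide),
      replace_eq_replCore _ _ _ (by decide),
      three_eq_scan text.toList.length text.toList le_rfl]
  calc (PySem.Str.replace (PySem.Str.replace (PySem.Str.replace text "<comment>" "This movie was amazing! Highly recommended.") "<commenter_name>" "MovieFan123") "<movie_name>" "Inception")
      = String.ofList (PySem.Str.replace (PySem.Str.replace (PySem.Str.replace text "<comment>" "This movie was amazing! Highly recommended.") "<commenter_name>" "MovieFan123") "<movie_name>" "Inception").toList := by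
        rw [String.ofList_toList]
    _ = String.ofList (pvScan text.toList) := by rw [this]
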